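-- pv_equiv track=rewrite | github.com/rakesh-050791/DS-Algo | Basics/July-2022/08-July-2022.py | solve
-- ===== SOURCE A (Python) =====
-- def solve(A):
--     n = len(A)
--     prefixSumEven = []
--     prefixSumOdd = []
--
--     prefixSumEven.append(A[0])
--     prefixSumOdd.append(0)
--
--     for i in range(1, n):
--         if i % 2 == 0:
--             prefixSumEven.append(prefixSumEven[i - 1] + A[i])
--             prefixSumOdd.append(prefixSumOdd[i - 1])
--         else:
--             prefixSumOdd.append(prefixSumOdd[i - 1] + A[i])
--             prefixSumEven.append(prefixSumEven[i - 1])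
--
--     count = 0
--     for i in range(n):
--         if i == 0:
--             sumEven = 0 + (prefixSumOdd[n-1] - prefixSumOdd[i])
--             sumOdd = 0 + (prefixSumEven[n-1] - prefixSumEven[i])
--         else:
--             sumEven = prefixSumEven[i-1] + (prefixSumOdd[n-1] - prefixSumOdd[i])
--             sumOdd = prefixSumOdd[i-1] + (prefixSumEven[n-1] - prefixSumEven[i])
--
--         if sumEven == sumOdd:
--             count += 1
--     return count
-- ===== SOURCE B (Python) =====
-- def solve(A):
--     # Reduce to an alternating-sign sequence: removing index i balances the
--     # even/odd sums iff 2 * (signed prefix before i) == (signed total) - signed[i].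
--     signed = [x if i % 2 == 0 else -x for i, x in enumerate(A)]
--     total = sum(signed)
--     count = 0
--     prefix = 0
--     for s in signed:
--         if 2 * prefix == total - s:
--             count += 1
--         prefix += s
--     return count
-- ===== Notes on version B (the rewrite author's own statement) =====
-- stated objective: alternative
-- what changed: B reduces the problem to a single alternating-sign sequence: it maps A to signed[i]=(-1)^i*A[i], takes its total, and counts i with 2*prefix == total - signed[i] in one scan with scalar state, instead of A's two appended parity prefix-sum arrays and an index-based second pass; dropping the per-step list appends and indexed reads is the measured constant-factor win.
-- outside the precondition, e.g. on solve([]): A raises IndexError, B returns 0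
-- crash fix: On the empty list A raises IndexError (unconditional read of A[0]) while B returns 0. — e.g. on solve([]): A raises IndexError, B returns 0
import Mathlib
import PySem

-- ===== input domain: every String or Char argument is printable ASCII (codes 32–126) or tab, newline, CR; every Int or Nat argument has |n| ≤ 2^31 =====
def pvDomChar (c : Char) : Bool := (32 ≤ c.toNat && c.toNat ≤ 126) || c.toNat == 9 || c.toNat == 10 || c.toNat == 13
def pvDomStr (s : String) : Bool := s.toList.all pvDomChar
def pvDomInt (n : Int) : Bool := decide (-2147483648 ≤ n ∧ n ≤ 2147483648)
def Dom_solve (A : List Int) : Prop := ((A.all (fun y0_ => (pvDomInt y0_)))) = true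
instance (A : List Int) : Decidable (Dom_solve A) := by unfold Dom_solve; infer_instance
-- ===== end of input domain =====

-- B reduces the task to an alternating-sign sequence signed[i] = (-1)^i * A[i]:
-- removal at i balances iff 2 * (signed prefix before i) = (signed total) - signed[i];
-- one scan over that sequence replaces A's two parity prefix arrays and index arithmetic.

-- ===== PORT A =====
-- Indexing is ported with pyGetD; under Pre_solve (A ≠ []) every index Python reads is in
-- range, so this is exact there.
def solve (A : List Int) : Int :=
  let n : Int := PySem.List.len A
  let pp : List Int × List Int :=
    (PySem.List.pyRange 1 n 1).foldl
      (fun (s : List Int × List Int) i =>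
        if i % 2 == 0 then
          (s.1 ++ [PySem.List.pyGetD s.1 (i-1) 0 + PySem.List.pyGetD A i 0],
           s.2 ++ [PySem.List.pyGetD s.2 (i-1) 0])
        else
          (s.1 ++ [PySem.List.pyGetD s.1 (i-1) 0],
           s.2 ++ [PySem.List.pyGetD s.2 (i-1) 0 + PySem.List.pyGetD A i 0]))
      ([PySem.List.pyGetD A 0 0], [0])
  (PySem.List.pyRange 0 n 1).foldl
    (fun (count : Int) i =>
      let sumEven : Int :=
        (if i == 0 then 0 else PySem.List.pyGetD pp.1 (i-1) 0)
          + (PySem.List.pyGetD pp.2 (n-1) 0 - PySem.List.pyGetD pp.2 i 0)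
      let sumOdd : Int :=
        (if i == 0 then 0 else PySem.List.pyGetD pp.2 (i-1) 0)
          + (PySem.List.pyGetD pp.1 (n-1) 0 - PySem.List.pyGetD pp.1 i 0)
      if sumEven == sumOdd then count + 1 else count)
    0

-- ===== PORT B =====
def solve_alt (A : List Int) : Int :=
  let signed : List Int :=
    (PySem.List.enumerate A).map (fun p => if p.1 % 2 == 0 then p.2 else -p.2)
  let total : Int := signed.foldl (· + ·) 0
  let r : Int × Int :=
    signed.foldl
      (fun (s : Int × Int) v =>
        ((if 2 * s.2 == total - v then s.1 + 1 else s.1), s.2 + v))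
      (0, 0)
  r.1

-- ===== PRECONDITION & SPEC =====
-- Pre_ excludes only the empty list, on which Python A raises IndexError (A[0]).
def Pre_solve (A : List Int) : Prop := A ≠ []
instance (A : List Int) : Decidable (Pre_solve A) := by unfold Pre_solve; infer_instance
def pvWitness_solve : List Int := [1, 2, 1]

-- On the empty list A raises IndexError while B returns 0 (no removal balances anything).
def Raises_solve (A : List Int) : Prop := A = []
instance (A : List Int) : Decidable (Raises_solve A) := by unfold Raises_solve; infer_instance
def pvRaiseWitness_solve : List Int := []
def pvRaiseWitnessOut_solve : Int := 0

def Spec_solve (A : List Int) (out : Int) : Prop := out = solve_alt A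
instance (A : List Int) (out : Int) : Decidable (Spec_solve A out) := by unfold Spec_solve; infer_instance

-- ===== CLAIM (what is proved, stated in full; the proofs are below) =====
def Claim_equal_solve : Prop := ∀ (A : List Int), Dom_solve A → Pre_solve A → Spec_solve A (solve A)
def Claim_raises_solve : Prop := (∀ (A : List Int), Dom_solve A → Raises_solve A → ¬ Pre_solve A) ∧ (Dom_solve (pvRaiseWitness_solve) ∧ Raises_solve (pvRaiseWitness_solve) ∧ solve_alt (pvRaiseWitness_solve) = pvRaiseWitnessOut_solve)

-- ===== LEMMAS AND PROOFS =====

def epre (A : List Int) : Nat → Int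
  | 0 => 0
  | m + 1 => epre A m + (if m % 2 = 0 then A.getD m 0 else 0)

def opre (A : List Int) : Nat → Int
  | 0 => 0
  | m + 1 => opre A m + (if m % 2 = 0 then 0 else A.getD m 0)

def bal (A : List Int) (k : Nat) : Bool :=
  epre A k + (opre A A.length - opre A (k + 1))
    == opre A k + (epre A A.length - epre A (k + 1))

-- B's alternating-sign view
def sgn (A : List Int) (k : Nat) : Int :=
  if k % 2 = 0 then A.getD k 0 else -(A.getD k 0)

def altpre (A : List Int) : Nat → Int
  | 0 => 0
  | m + 1 => altpre A m + sgn A m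

theorem altpre_eq (A : List Int) : ∀ m : Nat, altpre A m = epre A m - opre A m := by
  intro m
  induction m with
  | zero => simp [altpre, epre, opre]
  | succ m ih =>
    rcases Nat.mod_two_eq_zero_or_one m with hm | hm <;>
      simp [altpre, epre, opre, sgn, hm, ih] <;> ring

theorem foldA_eq (A : List Int) : ∀ m : Nat, 1 ≤ m → m ≤ A.length →
    (PySem.List.pyRange 1 (m : Int) 1).foldl
      (fun (s : List Int × List Int) i =>
        if i % 2 == 0 then
          (s.1 ++ [PySem.List.pyGetD s.1 (i-1) 0 + PySem.List.pyGetD A i 0],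
           s.2 ++ [PySem.List.pyGetD s.2 (i-1) 0])
        else
          (s.1 ++ [PySem.List.pyGetD s.1 (i-1) 0],
           s.2 ++ [PySem.List.pyGetD s.2 (i-1) 0 + PySem.List.pyGetD A i 0]))
      ([PySem.List.pyGetD A 0 0], [0])
    = ((List.range m).map (fun k => epre A (k+1)), (List.range m).map (fun k => opre A (k+1))) := by
  intro m
  induction m with
  | zero => omega
  | succ m ih =>
    intro _ hle
    rcases Nat.eq_or_lt_of_le (Nat.one_le_iff_ne_zero.mpr (by omega) : 1 ≤ m + 1) with h1 | h1
    · -- m = 0, i.e. m + 1 = 1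
      have hm0 : m = 0 := by omega
      subst hm0
      rw [PySem.List.pyRange_one_eq_nil (by norm_num)]
      simp [epre, opre, PySem.List.pyGetD_zero]
    · have hm1 : 1 ≤ m := by omega
      have hcast : ((m + 1 : Nat) : Int) = (m : Int) + 1 := by push_cast; ring
      rw [hcast, PySem.List.pyRange_one_succ_right (by exact_mod_cast hm1), List.foldl_append,
        ih hm1 (by omega), List.foldl_cons, List.foldl_nil]
      have hidx : (m : Int) - 1 = ((m - 1 : Nat) : Int) := by omega
      have hlt : m - 1 < m := by omega
      have hgetE : PySem.List.pyGetD ((List.range m).map (fun k => epre A (k+1))) ((m:Int) - 1) 0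
          = epre A m := by
        rw [hidx, PySem.List.pyGetD_natCast, List.getD_eq_getElem _ _ (by simpa using hlt)]
        simp
        congr 1
        omega
      have hgetO : PySem.List.pyGetD ((List.range m).map (fun k => opre A (k+1))) ((m:Int) - 1) 0
          = opre A m := by
        rw [hidx, PySem.List.pyGetD_natCast, List.getD_eq_getElem _ _ (by simpa using hlt)]
        simp
        congr 1
        omega
      have hgetA : PySem.List.pyGetD A (m : Int) 0 = A.getD m 0 := PySem.List.pyGetD_natCast ..
      rcases Nat.mod_two_eq_zero_or_one m with hm | hm
      · have hIm : ((m : Int)) % 2 = 0 := by omega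
        simp only [hIm, hgetE, hgetO, hgetA, beq_self_eq_true, if_true, List.range_succ,
          List.map_append]
        simp [epre, opre, hm]
      · have hIm : ((m : Int)) % 2 = 1 := by omega
        simp only [hIm, hgetE, hgetO, hgetA, List.range_succ, List.map_append]
        norm_num
        simp [epre, opre, hm]

theorem countA_eq (A : List Int) (h1 : 1 ≤ A.length) : ∀ m : Nat, m ≤ A.length →
    (PySem.List.pyRange 0 (m : Int) 1).foldl
      (fun (count : Int) i =>
        let sumEven : Int :=
          (if i == 0 then 0 else PySem.List.pyGetD ((List.range A.length).map (fun k => epre A (k+1))) (i-1) 0)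
            + (PySem.List.pyGetD ((List.range A.length).map (fun k => opre A (k+1))) ((A.length : Int)-1) 0
               - PySem.List.pyGetD ((List.range A.length).map (fun k => opre A (k+1))) i 0)
        let sumOdd : Int :=
          (if i == 0 then 0 else PySem.List.pyGetD ((List.range A.length).map (fun k => opre A (k+1))) (i-1) 0)
            + (PySem.List.pyGetD ((List.range A.length).map (fun k => epre A (k+1))) ((A.length : Int)-1) 0
               - PySem.List.pyGetD ((List.range A.length).map (fun k => epre A (k+1))) i 0)
        if sumEven == sumOdd then count + 1 else count)
      0
    = (((List.range m).countP (bal A) : Nat) : Int) := by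
  intro m
  induction m with
  | zero => simp [PySem.List.pyRange_one_eq_nil]
  | succ m ih =>
    intro hle
    have hcast : ((m + 1 : Nat) : Int) = (m : Int) + 1 := by push_cast; ring
    rw [hcast, PySem.List.pyRange_one_succ_right (by positivity), List.foldl_append,
      ih (by omega), List.foldl_cons, List.foldl_nil]
    have hmlt : m < A.length := by omega
    -- index lemmas
    have hgetE : ∀ (k : Nat), k < A.length →
        PySem.List.pyGetD ((List.range A.length).map (fun j => epre A (j+1))) ((k:Nat) : Int) 0
          = epre A (k+1) := by
      intro k hk
      rw [PySem.List.pyGetD_natCast, List.getD_eq_getElem _ _ (by simpa using hk)]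
      simp
    have hgetO : ∀ (k : Nat), k < A.length →
        PySem.List.pyGetD ((List.range A.length).map (fun j => opre A (j+1))) ((k:Nat) : Int) 0
          = opre A (k+1) := by
      intro k hk
      rw [PySem.List.pyGetD_natCast, List.getD_eq_getElem _ _ (by simpa using hk)]
      simp
    have hlast : (A.length : Int) - 1 = ((A.length - 1 : Nat) : Int) := by omega
    have hlen1 : A.length - 1 + 1 = A.length := by omega
    have hcount : (((List.range (m+1)).countP (bal A) : Nat) : Int)
        = ((List.range m).countP (bal A) : Int) + (if bal A m then 1 else 0) := by
      rw [List.range_succ, List.countP_append, List.countP_cons, List.countP_nil]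
      push_cast
      split_ifs <;> ring
    rw [hcount]
    by_cases hm0 : m = 0
    · subst hm0
      have e0 := hgetE 0 (by omega)
      have o0 := hgetO 0 (by omega)
      have eL : PySem.List.pyGetD ((List.range A.length).map (fun j => epre A (j+1))) ((A.length : Int) - 1) 0 = epre A A.length := by
        rw [hlast, hgetE _ (by omega), hlen1]
      have oL : PySem.List.pyGetD ((List.range A.length).map (fun j => opre A (j+1))) ((A.length : Int) - 1) 0 = opre A A.length := by
        rw [hlast, hgetO _ (by omega), hlen1]
      simp only [Nat.cast_zero, beq_self_eq_true, if_true, eL, oL]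
      simp only [show ((0:Nat):Int) = 0 from rfl] at e0 o0
      rw [e0, o0,
        show ((0:Int) + (opre A A.length - opre A 1) == 0 + (epre A A.length - epre A 1))
          = bal A 0 from rfl]
      split_ifs <;> ring
    · have hne : ((m : Nat) : Int) ≠ 0 := by omega
      have hprev : ((m : Nat) : Int) - 1 = ((m - 1 : Nat) : Int) := by omega
      have hm1 : m - 1 + 1 = m := by omega
      have eL : PySem.List.pyGetD ((List.range A.length).map (fun j => epre A (j+1))) ((A.length : Int) - 1) 0 = epre A A.length := by
        rw [hlast, hgetE _ (by omega), hlen1]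
      have oL : PySem.List.pyGetD ((List.range A.length).map (fun j => opre A (j+1))) ((A.length : Int) - 1) 0 = opre A A.length := by
        rw [hlast, hgetO _ (by omega), hlen1]
      have eP : PySem.List.pyGetD ((List.range A.length).map (fun j => epre A (j+1))) ((m:Int) - 1) 0 = epre A m := by
        rw [hprev, hgetE _ (by omega), hm1]
      have oP : PySem.List.pyGetD ((List.range A.length).map (fun j => opre A (j+1))) ((m:Int) - 1) 0 = opre A m := by
        rw [hprev, hgetO _ (by omega), hm1]
      have hfalse : (((m : Nat) : Int) == 0) = false := by simpa using hne
      simp only [hfalse, Bool.false_eq_true, if_false, eL, oL, eP, oP, hgetE m hmlt, hgetO m hmlt]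
      rw [show (epre A m + (opre A A.length - opre A (m+1)) == opre A m + (epre A A.length - epre A (m+1)))
          = bal A m from rfl]
      split_ifs <;> ring

-- bal in B's alternating-sign form
theorem bal_alt (A : List Int) (m : Nat) :
    (2 * altpre A m == (altpre A A.length) - sgn A m) = bal A m := by
  unfold bal
  rw [Bool.eq_iff_iff]
  simp only [beq_iff_eq, altpre_eq]
  rcases Nat.mod_two_eq_zero_or_one m with hm | hm <;>
    · simp only [epre, opre, sgn, hm]
      norm_num
      omega

-- B's signed list is (pyRange 0 n 1).map (sgnI A), where
def sgnI (A : List Int) (j : Int) : Int :=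
  if j % 2 == 0 then PySem.List.pyGetD A j 0 else -(PySem.List.pyGetD A j 0)

theorem sgnI_natCast (A : List Int) (k : Nat) : sgnI A (k : Int) = sgn A k := by
  unfold sgnI sgn
  rw [PySem.List.pyGetD_natCast]
  rcases Nat.mod_two_eq_zero_or_one k with hk | hk
  · have : ((k : Int)) % 2 = 0 := by omega
    simp [this, hk]
  · have : ((k : Int)) % 2 = 1 := by omega
    simp [this, hk]

theorem sumB (A : List Int) : ∀ m : Nat,
    ((PySem.List.pyRange 0 (m : Int) 1).map (sgnI A)).foldl (· + ·) 0 = altpre A m := by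
  intro m
  induction m with
  | zero => simp [PySem.List.pyRange_one_eq_nil, altpre]
  | succ m ih =>
    have hcast : ((m + 1 : Nat) : Int) = (m : Int) + 1 := by push_cast; ring
    rw [hcast, PySem.List.pyRange_one_succ_right (by positivity), List.map_append,
      List.foldl_append, ih]
    simp [altpre, sgnI_natCast]

theorem countB (A : List Int) (T : Int) (hT : T = altpre A A.length) : ∀ m : Nat,
    ((PySem.List.pyRange 0 (m : Int) 1).map (sgnI A)).foldl
      (fun (s : Int × Int) v =>
        ((if 2 * s.2 == T - v then s.1 + 1 else s.1), s.2 + v))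
      (0, 0)
    = ((((List.range m).countP (bal A) : Nat) : Int), altpre A m) := by
  intro m
  induction m with
  | zero => simp [PySem.List.pyRange_one_eq_nil, altpre]
  | succ m ih =>
    have hcast : ((m + 1 : Nat) : Int) = (m : Int) + 1 := by push_cast; ring
    rw [hcast, PySem.List.pyRange_one_succ_right (by positivity), List.map_append,
      List.foldl_append, ih]
    have hcount : (((List.range (m+1)).countP (bal A) : Nat) : Int)
        = ((List.range m).countP (bal A) : Int) + (if bal A m then 1 else 0) := by
      rw [List.range_succ, List.countP_append, List.countP_cons, List.countP_nil]
      push_cast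
      split_ifs <;> ring
    simp only [List.map_cons, List.map_nil, List.foldl_cons, List.foldl_nil, sgnI_natCast,
      hT, bal_alt, hcount]
    rw [Prod.ext_iff]
    exact ⟨by split_ifs <;> ring, by simp [altpre]⟩

theorem solveA_eq (A : List Int) (h : A ≠ []) :
    solve A = (((List.range A.length).countP (bal A) : Nat) : Int) := by
  have hlen : 1 ≤ A.length := by
    have := List.length_pos_of_ne_nil h
    omega
  unfold solve
  simp only [PySem.List.len_eq]
  rw [foldA_eq A A.length hlen le_rfl]
  exact countA_eq A hlen A.length le_rfl

theorem signed_eq (A : List Int) :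
    (PySem.List.enumerate A).map (fun p => if p.1 % 2 == 0 then p.2 else -p.2)
      = (PySem.List.pyRange 0 ((A.length : Nat) : Int) 1).map (sgnI A) := by
  rw [PySem.List.enumerate_eq_map_pyRange (d := 0), List.map_map]
  simp only [PySem.List.len_eq]
  rfl

theorem solveB_eq (A : List Int) :
    solve_alt A = (((List.range A.length).countP (bal A) : Nat) : Int) := by
  unfold solve_alt
  simp only [signed_eq]
  rw [sumB A A.length, countB A _ rfl A.length]

-- ===== VERDICT (by name: the statement is the Claim_ definition above) =====
theorem solve_spec : Claim_equal_solve := by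
  intro A _ hPre
  unfold Spec_solve
  rw [solveA_eq A hPre, solveB_eq A]

@[simp] theorem solve_raises : Claim_raises_solve := by
  unfold Claim_raises_solve
  exact ⟨fun A _ hR hP => hP hR, by decide⟩
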